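-- pv_equiv track=rewrite | github.com/volcengine/verl | atropos/environments/intern_bootcamp/internbootcamp_lib/internbootcamp/bootcamp/bbeh_multistep_arithmetic/multistep_arithmetic.py | _count_operators
-- ===== SOURCE A (Python) =====
-- from typing import Dict, Any, Optional, Union
--
-- def _count_operators(expression: str) -> Dict[str, int]:
--     """统计表达式中的运算符使用情况"""
--     operators = {
--         '+': 0, '-': 0, '*': 0, '/': 0, '><': 0, ';': 0,
--         '@': 0, '<>': 0, '[]': 0, '#': 0, '!': 0, '~': 0,
--         '&': 0, ':': 0, '][': 0
--     }
--
--     i = 0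
--     while i < len(expression):
--         # 检查两字符运算符
--         if i + 1 < len(expression):
--             two_char = expression[i:i + 2]
--             if two_char in operators:
--                 operators[two_char] += 1
--                 i += 2
--                 continue
--
--         # 检查单字符运算符
--         if expression[i] in operators:
--             operators[expression[i]] += 1
--
--         i += 1
--
--     return {op: count for op, count in operators.items() if count > 0}
-- ===== SOURCE B (Python) =====
-- import re
--
-- _TOKEN_RE = re.compile(r'><|<>|\[\]|\]\[|[-+*/;@#!~&:]')
-- _ORDER = ('+', '-', '*', '/', '><', ';', '@', '<>', '[]', '#', '!', '~', '&', ':', '][')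
--
-- def _count_operators(expression: str):
--     """Tokenize with a regex (two-char operators first), then count each operator."""
--     tokens = _TOKEN_RE.findall(expression)
--     return {op: tokens.count(op) for op in _ORDER if op in tokens}
-- ===== Notes on version B (the rewrite author's own statement) =====
-- stated objective: idiomatic
-- what changed: Replaces the hand-written index/while scan over a mutable count dict with a regex tokenizer (two-char alternatives first, matching the greedy scan) followed by counting each operator in the token list.
import Mathlib
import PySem

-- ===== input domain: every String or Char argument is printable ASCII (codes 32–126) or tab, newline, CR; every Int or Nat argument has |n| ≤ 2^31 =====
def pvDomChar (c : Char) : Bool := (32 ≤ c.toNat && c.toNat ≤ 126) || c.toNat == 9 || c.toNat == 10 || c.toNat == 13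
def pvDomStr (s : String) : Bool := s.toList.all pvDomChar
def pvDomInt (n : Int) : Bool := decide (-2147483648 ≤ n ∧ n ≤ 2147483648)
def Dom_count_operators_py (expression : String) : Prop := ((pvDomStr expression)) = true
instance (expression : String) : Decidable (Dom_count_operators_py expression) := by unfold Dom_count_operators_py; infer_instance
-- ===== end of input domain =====

-- B replaces A's index/while scan over a mutable count dict by a regex-style tokenizer
-- (two-char alternatives first) followed by counting each operator in the token list (idiomatic; same cost).

-- ===== PORT A =====
-- the initial 'operators' dict of A, all counts 0, in A's insertion order
def opsInit : PySem.Dict String Int :=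
  PySem.Dict.ofList [("+", 0), ("-", 0), ("*", 0), ("/", 0), ("><", 0), (";", 0),
                     ("@", 0), ("<>", 0), ("[]", 0), ("#", 0), ("!", 0), ("~", 0),
                     ("&", 0), (":", 0), ("][", 0)]

-- A's while loop over the index i, as structural recursion over the remaining characters
def aLoop : List Char → PySem.Dict String Int → PySem.Dict String Int
  | c1 :: c2 :: rest, d =>
      -- i + 1 < len: check the two-char operator first
      if d.contains (String.ofList [c1, c2]) then
        aLoop rest (d.modify (String.ofList [c1, c2]) 0 (· + 1))
      else if d.contains (String.ofList [c1]) then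
        aLoop (c2 :: rest) (d.modify (String.ofList [c1]) 0 (· + 1))
      else aLoop (c2 :: rest) d
  | [c], d =>
      if d.contains (String.ofList [c]) then d.modify (String.ofList [c]) 0 (· + 1) else d
  | [], d => d

def count_operators_py (expression : String) : List (String × Int) :=
  ((aLoop expression.toList opsInit).items).filter (fun p => 0 < p.2)

-- ===== PORT B =====
-- operator order of B's _ORDER tuple
def ORDER : List String := ["+", "-", "*", "/", "><", ";", "@", "<>", "[]", "#", "!", "~", "&", ":", "]["]
-- the single-char operator character class of B's regex
def OPS1 : List Char := ['-', '+', '*', '/', ';', '@', '#', '!', '~', '&', ':']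

-- hand port of re.findall(r'><|<>|\[\]|\]\[|[-+*/;@#!~&:]', s): leftmost non-overlapping
-- matches, alternatives tried in order; exact for this pattern (no alternative prefixes another)
def tokenize : List Char → List String
  | c1 :: c2 :: rest =>
      if (c1 = '>' ∧ c2 = '<') ∨ (c1 = '<' ∧ c2 = '>') ∨ (c1 = '[' ∧ c2 = ']') ∨ (c1 = ']' ∧ c2 = '[') then
        String.ofList [c1, c2] :: tokenize rest
      else if c1 ∈ OPS1 then String.ofList [c1] :: tokenize (c2 :: rest)
      else tokenize (c2 :: rest)
  | [c] => if c ∈ OPS1 then [String.ofList [c]] else []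
  | [] => []

def count_operators_py_alt (expression : String) : List (String × Int) :=
  let tokens := tokenize expression.toList
  (ORDER.filter (fun op => tokens.contains op)).map (fun op => (op, PySem.List.count tokens op))

-- ===== PRECONDITION & SPEC =====
def Spec_count_operators_py (expression : String) (out : List (String × Int)) : Prop := out = count_operators_py_alt expression
instance (expression : String) (out : List (String × Int)) : Decidable (Spec_count_operators_py expression out) := by unfold Spec_count_operators_py; infer_instance

-- ===== CLAIM (what is proved, stated in full; the proofs are below) =====
def Claim_equal_count_operators_py : Prop := ∀ (expression : String), Dom_count_operators_py expression → Spec_count_operators_py expression (count_operators_py expression)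

-- ===== LEMMAS AND PROOFS =====

theorem mem_ORDER_two (c1 c2 : Char) :
    (String.ofList [c1, c2] ∈ ORDER) ↔
      ((c1 = '>' ∧ c2 = '<') ∨ (c1 = '<' ∧ c2 = '>') ∨ (c1 = '[' ∧ c2 = ']') ∨ (c1 = ']' ∧ c2 = '[')) := by
  simp only [ORDER, List.mem_cons, List.not_mem_nil, or_false,
    show ("+" : String) = String.ofList ['+'] from rfl,
    show ("-" : String) = String.ofList ['-'] from rfl,
    show ("*" : String) = String.ofList ['*'] from rfl,
    show ("/" : String) = String.ofList ['/'] from rfl,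
    show ("><" : String) = String.ofList ['>', '<'] from rfl,
    show (";" : String) = String.ofList [';'] from rfl,
    show ("@" : String) = String.ofList ['@'] from rfl,
    show ("<>" : String) = String.ofList ['<', '>'] from rfl,
    show ("[]" : String) = String.ofList ['[', ']'] from rfl,
    show ("#" : String) = String.ofList ['#'] from rfl,
    show ("!" : String) = String.ofList ['!'] from rfl,
    show ("~" : String) = String.ofList ['~'] from rfl,
    show ("&" : String) = String.ofList ['&'] from rfl,
    show (":" : String) = String.ofList [':'] from rfl,
    show ("][" : String) = String.ofList [']', '['] from rfl,
    String.ofList_inj]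
  simp

theorem mem_ORDER_one (c : Char) : (String.ofList [c] ∈ ORDER) ↔ (c ∈ OPS1) := by
  simp only [ORDER, OPS1, List.mem_cons, List.not_mem_nil, or_false,
    show ("+" : String) = String.ofList ['+'] from rfl,
    show ("-" : String) = String.ofList ['-'] from rfl,
    show ("*" : String) = String.ofList ['*'] from rfl,
    show ("/" : String) = String.ofList ['/'] from rfl,
    show ("><" : String) = String.ofList ['>', '<'] from rfl,
    show (";" : String) = String.ofList [';'] from rfl,
    show ("@" : String) = String.ofList ['@'] from rfl,
    show ("<>" : String) = String.ofList ['<', '>'] from rfl,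
    show ("[]" : String) = String.ofList ['[', ']'] from rfl,
    show ("#" : String) = String.ofList ['#'] from rfl,
    show ("!" : String) = String.ofList ['!'] from rfl,
    show ("~" : String) = String.ofList ['~'] from rfl,
    show ("&" : String) = String.ofList ['&'] from rfl,
    show (":" : String) = String.ofList [':'] from rfl,
    show ("][" : String) = String.ofList [']', '['] from rfl,
    String.ofList_inj]
  simp
  tauto

theorem opsInit_keys : opsInit.keys = ORDER := by decide

theorem keys_modify_mem (d : PySem.Dict String Int) (k : String) (h : k ∈ d.keys) :
    (d.modify k 0 (· + 1)).keys = d.keys := by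
  rw [PySem.Dict.keys_modify, PySem.Dict.keys_insert_of_contains]
  rw [PySem.Dict.contains_eq_decide_mem_keys]
  simpa using h

theorem tokenize_mem_ORDER : ∀ cs, ∀ t ∈ tokenize cs, t ∈ ORDER
  | c1 :: c2 :: rest, t, ht => by
      rw [tokenize] at ht
      split_ifs at ht with h1 h2
      · rcases List.mem_cons.mp ht with rfl | ht
        · exact (mem_ORDER_two c1 c2).mpr h1
        · exact tokenize_mem_ORDER rest t ht
      · rcases List.mem_cons.mp ht with rfl | ht
        · exact (mem_ORDER_one c1).mpr h2
        · exact tokenize_mem_ORDER (c2 :: rest) t ht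
      · exact tokenize_mem_ORDER (c2 :: rest) t ht
  | [c], t, ht => by
      rw [tokenize] at ht
      split_ifs at ht with h1
      · rcases List.mem_cons.mp ht with rfl | ht
        · exact (mem_ORDER_one c).mpr h1
        · simp at ht
      · simp at ht
  | [], t, ht => by simp [tokenize] at ht

theorem aLoop_eq_foldl : ∀ cs (d : PySem.Dict String Int), d.keys = ORDER →
    aLoop cs d = (tokenize cs).foldl (fun d x => d.modify x 0 (· + 1)) d
  | c1 :: c2 :: rest, d, h => by
      rw [aLoop, tokenize]
      have hc2 : d.contains (String.ofList [c1, c2]) =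
          decide ((c1 = '>' ∧ c2 = '<') ∨ (c1 = '<' ∧ c2 = '>') ∨ (c1 = '[' ∧ c2 = ']') ∨ (c1 = ']' ∧ c2 = '[')) := by
        rw [PySem.Dict.contains_eq_decide_mem_keys, h]
        simp [mem_ORDER_two]
      have hc1 : d.contains (String.ofList [c1]) = decide (c1 ∈ OPS1) := by
        rw [PySem.Dict.contains_eq_decide_mem_keys, h]
        simp [mem_ORDER_one]
      rw [hc2, hc1]
      by_cases h2 : (c1 = '>' ∧ c2 = '<') ∨ (c1 = '<' ∧ c2 = '>') ∨ (c1 = '[' ∧ c2 = ']') ∨ (c1 = ']' ∧ c2 = '[')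
      · simp only [h2, decide_true, if_true, List.foldl_cons]
        exact aLoop_eq_foldl rest _ (by
          rw [keys_modify_mem _ _ (by rw [h]; exact (mem_ORDER_two c1 c2).mpr h2)]; exact h)
      · simp only [h2, decide_false, if_false]
        by_cases h1 : c1 ∈ OPS1
        · simp only [h1, decide_true, if_true, List.foldl_cons]
          exact aLoop_eq_foldl (c2 :: rest) _ (by
            rw [keys_modify_mem _ _ (by rw [h]; exact (mem_ORDER_one c1).mpr h1)]; exact h)
        · simp only [h1, decide_false, if_false]
          exact aLoop_eq_foldl (c2 :: rest) d h
  | [c], d, h => by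
      rw [aLoop, tokenize]
      have hc1 : d.contains (String.ofList [c]) = decide (c ∈ OPS1) := by
        rw [PySem.Dict.contains_eq_decide_mem_keys, h]
        simp [mem_ORDER_one]
      rw [hc1]
      by_cases h1 : c ∈ OPS1 <;> simp [h1]
  | [], d, h => by rw [aLoop, tokenize]; rfl

theorem opsInit_getD (k : String) (hk : k ∈ ORDER) : opsInit.getD k 0 = 0 := by
  fin_cases hk <;> decide

theorem ORDER_nodup : ORDER.Nodup := by decide

-- the final dict of A's loop, item by item
theorem aLoop_items (cs : List Char) :
    (aLoop cs opsInit).items = ORDER.map (fun k => (k, ((tokenize cs).count k : Int))) := by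
  rw [aLoop_eq_foldl cs opsInit opsInit_keys]
  have hkeys : ((tokenize cs).foldl (fun d x => d.modify x 0 (· + 1)) opsInit).keys = ORDER := by
    rw [PySem.Dict.keys_foldl_modify (f := fun _ _ => (· + 1)), opsInit_keys,
      PySem.Set.update_eq_append_filter]
    have : (List.filter (fun y => !(PySem.Set.contains ORDER y)) (PySem.Set.ofList (tokenize cs))) = [] := by
      rw [List.filter_eq_nil_iff]
      intro a ha
      have : a ∈ ORDER := tokenize_mem_ORDER cs a (by simpa using (PySem.Set.mem_ofList _ _).mp ha)
      simp [this]
    rw [this, List.append_nil]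
  rw [PySem.Dict.items_eq_map_keys _ (by rw [hkeys]; exact ORDER_nodup) 0, hkeys]
  refine List.map_congr_left (fun k hk => ?_)
  rw [PySem.Dict.getD_foldl_modify_add_one, opsInit_getD k hk, zero_add]

-- ===== VERDICT (by name: the statement is the Claim_ definition above) =====
theorem count_operators_py_spec : Claim_equal_count_operators_py := by
  intro expression _
  unfold Spec_count_operators_py count_operators_py count_operators_py_alt
  rw [aLoop_items, List.filter_map]
  have hfil : ORDER.filter ((fun p : String × Int => decide (0 < p.2)) ∘ (fun k => (k, ((tokenize expression.toList).count k : Int)))) =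
      ORDER.filter (fun op => (tokenize expression.toList).contains op) := by
    apply List.filter_congr
    intro k _
    simp [List.count_pos_iff]
  rw [hfil]
  apply List.map_congr_left
  intro k hk
  simp [PySem.List.count_eq]
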